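-- pv_equiv track=rewrite | github.com/zunlu/Algorithm | 数组求和统计.py | countLR
-- ===== SOURCE A (Python) =====
-- def countLR( a , b ):
--     total = 0
--     suma=[0]*len(a)
--     suma[0]=a[0]
--     for i in range(1,len(a)):
--         suma[i] = suma[i-1]+a[i]
--     for i in range(len(a)):
--         for j in range(i,len(a)):
--             if(suma[j]-suma[i]+a[i] == b[i]+b[j]):
--                 total +=1
--     return total
-- ===== SOURCE B (Python) =====
-- def countLR(a, b):
--     # One pass: pair (i<=j) matches iff suma[j]-b[j] == suma[i]-a[i]+b[i];
--     # count matches with a hash map of the left-hand keys seen so far.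
--     total = 0
--     s = 0
--     cnt = {}
--     for j in range(len(a)):
--         s += a[j]
--         g = s - a[j] + b[j]
--         cnt[g] = cnt.get(g, 0) + 1
--         total += cnt.get(s - b[j], 0)
--     return total
-- ===== Notes on version B (the rewrite author's own statement) =====
-- stated objective: faster
-- what changed: Replaces A's O(n^2) double loop over all pairs (i,j) by a single pass that keeps a running prefix sum and a hash-map counter of the keys suma[i]-a[i]+b[i], adding for each j the number of earlier indices whose key equals suma[j]-b[j].
import Mathlib
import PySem

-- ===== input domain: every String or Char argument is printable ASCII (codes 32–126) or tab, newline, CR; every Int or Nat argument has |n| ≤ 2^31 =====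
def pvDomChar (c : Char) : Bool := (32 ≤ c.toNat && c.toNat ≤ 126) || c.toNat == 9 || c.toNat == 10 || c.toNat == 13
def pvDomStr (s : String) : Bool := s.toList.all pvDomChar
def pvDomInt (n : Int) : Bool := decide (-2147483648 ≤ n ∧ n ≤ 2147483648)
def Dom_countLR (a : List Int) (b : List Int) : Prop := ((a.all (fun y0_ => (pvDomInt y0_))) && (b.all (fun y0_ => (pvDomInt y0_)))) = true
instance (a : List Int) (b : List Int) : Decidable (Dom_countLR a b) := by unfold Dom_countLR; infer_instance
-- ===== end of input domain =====

-- B replaces A's quadratic double loop by a single pass with a hash-map counter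
-- of the keys suma[i]-a[i]+b[i]; same return value on Pre_ (objective: faster).

-- ===== PORT A =====
def countLR (a : List Int) (b : List Int) : Int :=
  let n : Int := PySem.List.len a
  let suma0 : List Int := List.replicate a.length (0 : Int)
  let suma1 : List Int := PySem.List.pySetD suma0 0 (PySem.List.pyGetD a 0 0)
  let suma : List Int := (PySem.List.pyRange 1 n 1).foldl
    (fun s i => PySem.List.pySetD s i
      (PySem.List.pyGetD s (i - 1) 0 + PySem.List.pyGetD a i 0)) suma1
  (PySem.List.pyRange 0 n 1).foldl (fun total i =>
    (PySem.List.pyRange i n 1).foldl (fun total j =>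
      if PySem.List.pyGetD suma j 0 - PySem.List.pyGetD suma i 0 + PySem.List.pyGetD a i 0
           = PySem.List.pyGetD b i 0 + PySem.List.pyGetD b j 0
      then total + 1 else total) total) 0

-- ===== PORT B =====
def countLR_alt (a : List Int) (b : List Int) : Int :=
  let r : Int × Int × PySem.Dict Int Int :=
    (PySem.List.pyRange 0 (PySem.List.len a) 1).foldl
      (fun st j =>
        let s := st.2.1 + PySem.List.pyGetD a j 0
        let g := s - PySem.List.pyGetD a j 0 + PySem.List.pyGetD b j 0
        let cnt := st.2.2.insert g (st.2.2.getD g 0 + 1)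
        (st.1 + cnt.getD (s - PySem.List.pyGetD b j 0) 0, s, cnt))
      ((0 : Int), (0 : Int), (PySem.Dict.empty : PySem.Dict Int Int))
  r.1

-- ===== PRECONDITION & SPEC =====
-- Pre_ excludes exactly the inputs on which Python A raises IndexError:
-- empty a (suma[0] = a[0]) and b shorter than a (b[i]/b[j] out of range).
def Pre_countLR (a : List Int) (b : List Int) : Prop :=
  a ≠ [] ∧ a.length ≤ b.length
instance (a : List Int) (b : List Int) : Decidable (Pre_countLR a b) := by
  unfold Pre_countLR; infer_instance
def pvWitness_countLR : List Int × List Int := ([1, 2, -1], [1, 1, 2])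

def Spec_countLR (a : List Int) (b : List Int) (out : Int) : Prop := out = countLR_alt a b
instance (a : List Int) (b : List Int) (out : Int) : Decidable (Spec_countLR a b out) := by unfold Spec_countLR; infer_instance

-- ===== CLAIM (what is proved, stated in full; the proofs are below) =====
def Claim_equal_countLR : Prop := ∀ (a : List Int) (b : List Int), Dom_countLR a b → Pre_countLR a b → Spec_countLR a b (countLR a b)

-- ===== LEMMAS AND PROOFS =====

-- prefix sum a[0] + … + a[i]
def pvPref (a : List Int) (i : Nat) : Int := ((a.take (i + 1)).sum)
-- the two matching keys:  pair (i ≤ j) counts iff pvG i = pvF j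
def pvG (a b : List Int) (i : Nat) : Int := pvPref a i - a.getD i 0 + b.getD i 0
def pvF (a b : List Int) (j : Nat) : Int := pvPref a j - b.getD j 0
def pvC (a b : List Int) (i j : Nat) : Int := if pvG a b i = pvF a b j then 1 else 0

theorem take_succ_sum (a : List Int) (m : Nat) :
    (a.take (m+1)).sum = (a.take m).sum + a.getD m 0 := by
  rw [List.take_add_one, List.sum_append, List.getD_eq_getElem?_getD]
  cases h : a[m]? <;> simp

theorem count_map_range (h : Nat → Int) (v : Int) (n : Nat) :
    ((((List.range n).map h).count v : Nat) : Int) = ∑ i ∈ Finset.range n, (if h i = v then (1:Int) else 0) := by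
  induction n with
  | zero => simp
  | succ n ih =>
    rw [List.range_succ, List.map_append, List.count_append, Finset.sum_range_succ, ← ih]
    by_cases hv : h n = v <;> simp [hv]

theorem counter_insert_step (xs : List Int) (x : Int) :
    (PySem.Dict.counter xs).insert x ((PySem.Dict.counter xs).getD x 0 + 1)
      = PySem.Dict.counter (xs ++ [x]) := by
  rw [← PySem.Dict.foldl_insert_getD_add_one_eq_counter,
      ← PySem.Dict.foldl_insert_getD_add_one_eq_counter, List.foldl_append]
  simp

theorem sum_map_range (f : Nat → Int) (n : Nat) :
    ((List.range n).map f).sum = ∑ i ∈ Finset.range n, f i := by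
  induction n with
  | zero => simp
  | succ n ih => simp [List.range_succ, Finset.sum_range_succ, ih]

theorem set_map_range (f : Nat → Int) (n m : Nat) :
    (((List.range n).map (fun i => if i < m then f i else 0)).set m (f m))
      = (List.range n).map (fun i => if i < m + 1 then f i else 0) := by
  apply List.ext_getElem; · simp
  intro k h1 h2
  simp only [List.getElem_set, List.getElem_map, List.getElem_range] at *
  by_cases hk : k = m
  · simp [hk]
  · simp; omega

theorem foldl_ite_one {α : Type} (p : α → Prop) [DecidablePred p] (l : List α) (t : Int) :
    l.foldl (fun t x => if p x then t + 1 else t) t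
      = t + (l.map (fun x => if p x then (1:Int) else 0)).sum := by
  induction l generalizing t with
  | nil => simp
  | cons x xs ih => by_cases h : p x <;> simp [h, ih] <;> ring

-- B's loop invariant: total, running sum and the counter after the first m steps
theorem altLoop (a b : List Int) (m : Nat) :
    ((PySem.List.pyRange 0 (m : Int) 1).foldl
      (fun st j =>
        let s := st.2.1 + PySem.List.pyGetD a j 0
        let g := s - PySem.List.pyGetD a j 0 + PySem.List.pyGetD b j 0
        let cnt := st.2.2.insert g (st.2.2.getD g 0 + 1)
        (st.1 + cnt.getD (s - PySem.List.pyGetD b j 0) 0, s, cnt))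
      ((0:Int), (0:Int), (PySem.Dict.empty : PySem.Dict Int Int)))
    = (∑ j ∈ Finset.range m, ∑ i ∈ Finset.range (j+1), pvC a b i j,
       (a.take m).sum,
       PySem.Dict.counter ((List.range m).map (pvG a b))) := by
  induction m with
  | zero =>
    rw [show ((0:Nat):Int) = 0 by norm_num, PySem.List.pyRange_one_eq_nil (by omega)]
    rw [← PySem.Dict.foldl_insert_getD_add_one_eq_counter]
    simp
  | succ m ih =>
    rw [show ((m+1:Nat):Int) = (m:Int)+1 by push_cast; ring,
        PySem.List.pyRange_one_succ_right (by positivity), List.foldl_append, ih]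
    simp only [List.foldl_cons, List.foldl_nil, PySem.List.pyGetD_natCast]
    have hs : (a.take m).sum + a.getD m 0 = pvPref a m := (take_succ_sum a m).symm
    have hg : (a.take m).sum + a.getD m 0 - a.getD m 0 + b.getD m 0 = pvG a b m := by
      unfold pvG; omega
    have hf : (a.take m).sum + a.getD m 0 - b.getD m 0 = pvF a b m := by
      unfold pvF; omega
    have hgl : (List.range (m+1)).map (pvG a b) = (List.range m).map (pvG a b) ++ [pvG a b m] := by
      rw [List.range_succ, List.map_append]; simp
    refine Prod.ext ?_ (Prod.ext ?_ ?_)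
    · show _ + _ = _
      rw [hg, hf, counter_insert_step, ← hgl, Finset.sum_range_succ]
      congr 1
      rw [PySem.Dict.getD_counter, count_map_range]
      apply Finset.sum_congr rfl
      intro i _
      unfold pvC
      by_cases h : pvG a b i = pvF a b m <;> simp [h]
    · exact hs
    · show _ = _
      rw [hg, counter_insert_step, ← hgl]

-- A's first loop: suma[i] = a[0] + … + a[i] on the first m entries
theorem sumaLoop (a : List Int) (m : Nat) (h1 : 1 ≤ m) (hm : m ≤ a.length) :
    ((PySem.List.pyRange 1 (m:Int) 1).foldl
      (fun s i => PySem.List.pySetD s i (PySem.List.pyGetD s (i-1) 0 + PySem.List.pyGetD a i 0))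
      (PySem.List.pySetD (List.replicate a.length (0:Int)) 0 (PySem.List.pyGetD a 0 0)))
    = (List.range a.length).map (fun i => if i < m then pvPref a i else 0) := by
  induction m with
  | zero => omega
  | succ m ih =>
    by_cases hm0 : m = 0
    · subst hm0
      rw [show ((0+1:Nat):Int) = 1 by norm_num, PySem.List.pyRange_one_eq_nil (by omega)]
      simp only [List.foldl_nil]
      rw [PySem.List.pyGetD_zero, show (0:Int) = ((0:Nat):Int) by norm_num,
          PySem.List.pySetD_natCast]
      apply List.ext_getElem; · simp
      intro k hk1 hk2
      simp only [List.getElem_set, List.getElem_map, List.getElem_range, List.getElem_replicate] at *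
      by_cases hk : k = 0
      · subst hk
        have : pvPref a 0 = a.getD 0 0 := by
          unfold pvPref; cases a <;> simp
        simp [this]
      · simp [hk]; omega
    · have ihh := ih (by omega) (by omega)
      rw [show ((m+1:Nat):Int) = (m:Int)+1 by push_cast; ring,
          PySem.List.pyRange_one_succ_right (by omega), List.foldl_append, ihh]
      simp only [List.foldl_cons, List.foldl_nil, PySem.List.pyGetD_natCast,
        PySem.List.pySetD_natCast]
      rw [show ((m:Int) - 1) = ((m-1:Nat):Int) by omega, PySem.List.pyGetD_natCast,
          PySem.List.getD_map_range _ _ _ _ (by omega)]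
      have hpr : (if m - 1 < m then pvPref a (m-1) else 0) + a.getD m 0 = pvPref a m := by
        rw [if_pos (by omega)]
        unfold pvPref
        rw [show m - 1 + 1 = m by omega, take_succ_sum]
      rw [hpr, set_map_range]

theorem countLR_eq_sum (a b : List Int) (h : a ≠ []) :
    countLR a b = ∑ i ∈ Finset.range a.length, ∑ j ∈ Finset.Ico i a.length, pvC a b i j := by
  have hn : 1 ≤ a.length := by
    cases a with
    | nil => exact absurd rfl h
    | cons x xs => simp
  unfold countLR
  simp only [PySem.List.len_eq]
  simp only [sumaLoop a a.length hn le_rfl]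
  set suma := (List.range a.length).map (fun i => if i < a.length then pvPref a i else 0) with hsuma
  have hfun : (fun (total : Int) (i : Int) =>
      (PySem.List.pyRange i (a.length:Int) 1).foldl
        (fun total j => if PySem.List.pyGetD suma j 0 - PySem.List.pyGetD suma i 0
            + PySem.List.pyGetD a i 0 = PySem.List.pyGetD b i 0 + PySem.List.pyGetD b j 0
          then total + 1 else total) total)
      = (fun (total : Int) (i : Int) => total +
          ((PySem.List.pyRange i (a.length:Int) 1).map
            (fun j => if PySem.List.pyGetD suma j 0 - PySem.List.pyGetD suma i 0
                + PySem.List.pyGetD a i 0 = PySem.List.pyGetD b i 0 + PySem.List.pyGetD b j 0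
              then (1:Int) else 0)).sum) := by
    funext t i
    exact foldl_ite_one _ _ t
  rw [hfun, PySem.List.foldl_add, zero_add,
      PySem.List.pyRange_one 0 (a.length:Int), List.map_map,
      show ((a.length:Int) - 0).toNat = a.length by omega, sum_map_range]
  apply Finset.sum_congr rfl
  intro i hi
  have hilt : i < a.length := Finset.mem_range.mp hi
  simp only [Function.comp, zero_add]
  rw [PySem.List.pyRange_one, List.map_map,
      show ((a.length:Int) - (i:Int)).toNat = a.length - i by omega, sum_map_range,
      Finset.sum_Ico_eq_sum_range]
  apply Finset.sum_congr rfl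
  intro k hk
  have hklt : k < a.length - i := Finset.mem_range.mp hk
  simp only [Function.comp]
  simp only [show ((i:Int) + (k:Int)) = ((i+k : Nat) : Int) by push_cast; ring,
    PySem.List.pyGetD_natCast, hsuma,
    PySem.List.getD_map_range _ _ _ _ (show i+k < a.length by omega),
    PySem.List.getD_map_range _ _ _ _ hilt,
    if_pos (show i+k < a.length by omega), if_pos hilt]
  unfold pvC pvG pvF
  by_cases hcond : pvPref a (i+k) - pvPref a i + a.getD i 0 = b.getD i 0 + b.getD (i+k) 0
  · rw [if_pos hcond, if_pos (by omega)]
  · rw [if_neg hcond, if_neg (by omega)]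

theorem countLR_alt_eq_sum (a b : List Int) :
    countLR_alt a b = ∑ j ∈ Finset.range a.length, ∑ i ∈ Finset.range (j + 1), pvC a b i j := by
  unfold countLR_alt
  simp only [PySem.List.len_eq]
  rw [altLoop a b a.length]

-- ===== VERDICT (by name: the statement is the Claim_ definition above) =====
theorem countLR_spec : Claim_equal_countLR := by
  intro a b _ hpre
  unfold Spec_countLR
  rw [countLR_eq_sum a b hpre.1, countLR_alt_eq_sum]
  simpa [← Finset.range_eq_Ico] using
    Finset.sum_Ico_Ico_comm 0 a.length (fun i j => pvC a b i j)
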